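-- pv_equiv track=rewrite | github.com/rajasekhar02/reading-x-source-code | Complete Reference/DynamicProgramming/8-23-2023_cses_array_description.py | recurse
-- ===== SOURCE A (Python) =====
-- def recurse(array, pos, prev_value, upBnd, n):
--     if pos == n:
--         return 1
--     allCombs = 0
--     if array[pos] == 0:
--         start = 1 if prev_value <= 1 else (prev_value - 1)
--         end = upBnd if prev_value == 0 else min((prev_value + 1), upBnd)
--         for i in range(start, end + 1):
--             if abs(prev_value - i) <= 1 or prev_value == 0:
--                 allCombs += recurse(array, pos + 1, i, upBnd, n)
--                 allCombs = allCombs % 1000000007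
--     else:
--         if abs(array[pos] - prev_value) <= 1:
--             allCombs = recurse(array, pos + 1, array[pos], upBnd, n)
--     return allCombs
-- ===== SOURCE B (Python) =====
-- def recurse(array, pos, prev_value, upBnd, n):
--     MOD = 1000000007
--     memo = {}
--
--     def kids(p, prev):
--         # the values allowed at position p given value prev at position p-1
--         a = array[p]
--         if a != 0:
--             return [a] if abs(a - prev) <= 1 else []
--         if prev == 0:
--             return list(range(1, upBnd + 1))
--         return list(range(1 if prev <= 1 else prev - 1, min(prev + 1, upBnd) + 1))
--
--     def go(p, prev):
--         if p == n:
--             return 1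
--         key = (p, prev)
--         if key in memo:
--             return memo[key]
--         tot = 0
--         for v in kids(p, prev):
--             tot = (tot + go(p + 1, v)) % MOD
--         memo[key] = tot
--         return tot
--
--     return go(pos, prev_value)
-- ===== Notes on version B (the rewrite author's own statement) =====
-- stated objective: alternative
-- what changed: B factors the transition into an explicit children-list function and evaluates each (position, previous-value) state once with a memo dictionary and one uniform mod-sum fold, instead of A's un-memoized three-branch recursion.
-- outside the precondition, e.g. on recurse([2, 7], 0, 2, 5, 3): A returns 0, B returns 0; on recurse([0], 0, -5, 5, 2): A returns 0, B returns 0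
import Mathlib
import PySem

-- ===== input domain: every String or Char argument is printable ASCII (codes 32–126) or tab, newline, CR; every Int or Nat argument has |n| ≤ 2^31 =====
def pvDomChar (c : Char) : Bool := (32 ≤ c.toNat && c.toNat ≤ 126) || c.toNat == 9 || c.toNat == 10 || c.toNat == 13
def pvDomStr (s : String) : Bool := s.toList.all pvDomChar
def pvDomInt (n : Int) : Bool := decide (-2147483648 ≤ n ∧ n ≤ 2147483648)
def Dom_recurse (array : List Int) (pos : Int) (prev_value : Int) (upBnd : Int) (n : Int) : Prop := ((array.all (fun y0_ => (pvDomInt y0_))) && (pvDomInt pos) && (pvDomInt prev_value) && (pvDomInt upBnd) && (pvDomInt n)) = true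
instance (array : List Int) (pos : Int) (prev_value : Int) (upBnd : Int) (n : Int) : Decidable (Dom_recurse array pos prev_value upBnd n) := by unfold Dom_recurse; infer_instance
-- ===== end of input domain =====

-- B separates the transition into an explicit children list and evaluates each (pos, prev) state
-- once via a memo dictionary, folding one uniform mod-sum over the children.

-- ===== PORT A =====
-- Fuel (n - pos).toNat is the exact recursion depth on Pre_ (pos ≤ n), where A always
-- terminates; the fuel-0 value 1 coincides with A's `pos == n` base case there.
def recurseA (array : List Int) (upBnd n : Int) : Nat → Int → Int → Int
  | 0, _, _ => 1
  | fuel + 1, pos, prev_value =>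
    if pos = n then 1
    else
      let a := PySem.List.pyGetD array pos 0    -- array[pos]; in range on Pre_
      if a = 0 then
        let start := if prev_value ≤ 1 then 1 else prev_value - 1
        let stop  := if prev_value = 0 then upBnd else min (prev_value + 1) upBnd
        (PySem.List.pyRange start (stop + 1) 1).foldl
          (fun allCombs i =>
            if |prev_value - i| ≤ 1 ∨ prev_value = 0 then
              PySem.Int.mod (allCombs + recurseA array upBnd n fuel (pos + 1) i) 1000000007
            else allCombs) 0
      else
        if |a - prev_value| ≤ 1 then recurseA array upBnd n fuel (pos + 1) a else 0

def recurse (array : List Int) (pos : Int) (prev_value : Int) (upBnd : Int) (n : Int) : Int :=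
  recurseA array upBnd n ((n - pos).toNat + 1) pos prev_value

-- ===== PORT B =====
-- Source B's `kids`: the values allowed at position p given value prev at position p - 1.
def kidsB (array : List Int) (upBnd : Int) (p prev : Int) : List Int :=
  let a := PySem.List.pyGetD array p 0    -- array[p]; in range on Pre_
  if a ≠ 0 then (if |a - prev| ≤ 1 then [a] else [])
  else if prev = 0 then PySem.List.pyRange 1 (upBnd + 1) 1
  else PySem.List.pyRange (if prev ≤ 1 then 1 else prev - 1) (min (prev + 1) upBnd + 1) 1

-- Source B's `go`, threading the memo dictionary through the one fold over the children.
def goB (array : List Int) (upBnd n : Int) :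
    Nat → Int → Int → PySem.Dict (Int × Int) Int → Int × PySem.Dict (Int × Int) Int
  | 0, _, _, memo => (1, memo)
  | fuel + 1, p, prev, memo =>
    if p = n then (1, memo)
    else
      match memo.get? (p, prev) with
      | some hit => (hit, memo)
      | none =>
        let r := (kidsB array upBnd p prev).foldl
          (fun s v =>
            let t := goB array upBnd n fuel (p + 1) v s.2
            (PySem.Int.mod (s.1 + t.1) 1000000007, t.2))
          (0, memo)
        (r.1, r.2.insert (p, prev) r.1)

def recurse_alt (array : List Int) (pos : Int) (prev_value : Int) (upBnd : Int) (n : Int) : Int :=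
  (goB array upBnd n ((n - pos).toNat + 1) pos prev_value PySem.Dict.empty).1

-- ===== PRECONDITION & SPEC =====
-- Pre_ admits: pos == n (A returns 1 at once); or -len(array) ≤ pos ≤ n ≤ len(array), where every
-- index A can touch is in range (possibly by Python's negative-index wraparound); or an immediate
-- dead end (array[pos] exists, is non-zero and differs from prev_value by more than 1, so A returns
-- 0 at once). Outside these A may raise IndexError or recurse without bound, though on some such
-- inputs a later constraint still fails early and A returns 0.
def Pre_recurse (array : List Int) (pos : Int) (prev_value : Int) (upBnd : Int) (n : Int) : Prop :=
  (-(array.length : Int) ≤ pos ∧ pos ≤ n ∧ n ≤ array.length) ∨ pos = n ∨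
  (pos ≠ n ∧ PySem.List.pyGetD array pos 0 ≠ 0 ∧ ¬ |PySem.List.pyGetD array pos 0 - prev_value| ≤ 1)
instance (array : List Int) (pos : Int) (prev_value : Int) (upBnd : Int) (n : Int) : Decidable (Pre_recurse array pos prev_value upBnd n) := by unfold Pre_recurse; infer_instance

def pvWitness_recurse : List Int × Int × Int × Int × Int := ([0, 2, 0], 0, 0, 3, 3)

def Spec_recurse (array : List Int) (pos : Int) (prev_value : Int) (upBnd : Int) (n : Int) (out : Int) : Prop := out = recurse_alt array pos prev_value upBnd n
instance (array : List Int) (pos : Int) (prev_value : Int) (upBnd : Int) (n : Int) (out : Int) : Decidable (Spec_recurse array pos prev_value upBnd n out) := by unfold Spec_recurse; infer_instance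

-- ===== CLAIM (what is proved, stated in full; the proofs are below) =====
def Claim_equal_recurse : Prop := ∀ (array : List Int) (pos : Int) (prev_value : Int) (upBnd : Int) (n : Int), Dom_recurse array pos prev_value upBnd n → Pre_recurse array pos prev_value upBnd n → Spec_recurse array pos prev_value upBnd n (recurse array pos prev_value upBnd n)

-- ===== LEMMAS AND PROOFS =====

-- A's values always lie in [0, 10^9 + 7)
lemma recurseA_bounds (array : List Int) (upBnd n : Int) :
    ∀ (fuel : Nat) (p prev : Int),
      0 ≤ recurseA array upBnd n fuel p prev ∧ recurseA array upBnd n fuel p prev < 1000000007 := by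
  intro fuel
  induction fuel with
  | zero => intro p prev; exact ⟨by norm_num [recurseA], by norm_num [recurseA]⟩
  | succ f ihf =>
    intro p prev
    have haux : ∀ (L : List Int) (acc : Int), 0 ≤ acc → acc < 1000000007 →
          0 ≤ L.foldl (fun allCombs i =>
              if |prev - i| ≤ 1 ∨ prev = 0 then
                PySem.Int.mod (allCombs + recurseA array upBnd n f (p + 1) i) 1000000007
              else allCombs) acc ∧
          L.foldl (fun allCombs i =>
              if |prev - i| ≤ 1 ∨ prev = 0 then
                PySem.Int.mod (allCombs + recurseA array upBnd n f (p + 1) i) 1000000007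
              else allCombs) acc < 1000000007 := by
        intro L
        induction L with
        | nil => intro acc h0 h1; exact ⟨h0, h1⟩
        | cons x L ihL =>
          intro acc h0 h1
          simp only [List.foldl_cons]
          by_cases hg : |prev - x| ≤ 1 ∨ prev = 0
          · rw [if_pos hg]
            exact ihL _ (PySem.Int.mod_nonneg _ (by norm_num)) (PySem.Int.mod_lt _ (by norm_num))
          · rw [if_neg hg]; exact ihL _ h0 h1
    by_cases h1 : p = n
    · rw [recurseA]; simp only [if_pos h1]; norm_num
    by_cases ha : PySem.List.pyGetD array p 0 = 0
    · rw [recurseA]; simp only [if_neg h1, if_pos ha]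
      exact haux _ 0 (by norm_num) (by norm_num)
    by_cases habs : |PySem.List.pyGetD array p 0 - prev| ≤ 1
    · rw [recurseA]; simp only [if_neg h1, if_neg ha, if_pos habs]
      exact ihf (p + 1) _
    · rw [recurseA]; simp only [if_neg h1, if_neg ha, if_neg habs]
      norm_num

-- memo invariant: every stored entry is the true value of A's recursion at that state
def GoodCache (array : List Int) (upBnd n : Int) (c : PySem.Dict (Int × Int) Int) : Prop :=
  ∀ p v x, c.get? (p, v) = some x → x = recurseA array upBnd n ((n - p).toNat + 1) p v

lemma goodCache_empty (array : List Int) (upBnd n : Int) :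
    GoodCache array upBnd n PySem.Dict.empty := by
  intro p v x h
  simp [PySem.Dict.get?_empty] at h

lemma goodCache_insert (array : List Int) (upBnd n : Int) (c : PySem.Dict (Int × Int) Int)
    (p v x : Int) (hc : GoodCache array upBnd n c)
    (hx : x = recurseA array upBnd n ((n - p).toNat + 1) p v) :
    GoodCache array upBnd n (c.insert (p, v) x) := by
  intro p' v' y hy
  rw [PySem.Dict.get?_insert] at hy
  by_cases hk : (p', v') = (p, v)
  · rw [if_pos hk] at hy
    obtain ⟨hp', hv'⟩ : p' = p ∧ v' = v := by simpa [Prod.ext_iff] using hk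
    subst hp'; subst hv'
    exact (Option.some.inj hy).symm.trans hx
  · rw [if_neg hk] at hy
    exact hc p' v' y hy

-- A's loop guard is always true on the generated range
lemma pvGuardTrue (prev_value upBnd i : Int)
    (hi : i ∈ PySem.List.pyRange (if prev_value ≤ 1 then 1 else prev_value - 1)
            ((if prev_value = 0 then upBnd else min (prev_value + 1) upBnd) + 1) 1) :
    |prev_value - i| ≤ 1 ∨ prev_value = 0 := by
  rw [PySem.List.mem_pyRange_one] at hi
  rcases hi with ⟨h1, h2⟩
  by_cases h0 : prev_value = 0
  · exact Or.inr h0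
  · left
    rw [abs_le]
    split_ifs at h1 h2 with hle <;> omega

-- when array[p] == 0, B's children list is exactly A's loop range
lemma kidsB_zero (array : List Int) (upBnd : Int) (p prev : Int)
    (ha : PySem.List.pyGetD array p 0 = 0) :
    kidsB array upBnd p prev
      = PySem.List.pyRange (if prev ≤ 1 then 1 else prev - 1)
          ((if prev = 0 then upBnd else min (prev + 1) upBnd) + 1) 1 := by
  unfold kidsB
  simp only [ha, ne_eq, not_true_eq_false, if_false]
  by_cases h0 : prev = 0
  · subst h0; norm_num
  · rw [if_neg h0, if_neg h0]

-- B's pair-state fold computes A's plain mod-sum of the children and preserves the invariant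
lemma fold_spec (array : List Int) (upBnd n : Int) (f : Nat) (p : Int)
    (IH : ∀ prev c, GoodCache array upBnd n c →
      (goB array upBnd n f (p + 1) prev c).1 = recurseA array upBnd n f (p + 1) prev ∧
      GoodCache array upBnd n (goB array upBnd n f (p + 1) prev c).2) :
    ∀ (L : List Int) (acc : Int) (c : PySem.Dict (Int × Int) Int), GoodCache array upBnd n c →
      (L.foldl (fun s v =>
          let t := goB array upBnd n f (p + 1) v s.2
          (PySem.Int.mod (s.1 + t.1) 1000000007, t.2)) (acc, c)).1
        = L.foldl (fun allCombs i =>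
            PySem.Int.mod (allCombs + recurseA array upBnd n f (p + 1) i) 1000000007) acc ∧
      GoodCache array upBnd n
        (L.foldl (fun s v =>
          let t := goB array upBnd n f (p + 1) v s.2
          (PySem.Int.mod (s.1 + t.1) 1000000007, t.2)) (acc, c)).2 := by
  intro L
  induction L with
  | nil => intro acc c hc; exact ⟨rfl, hc⟩
  | cons i L ihL =>
    intro acc c hc
    obtain ⟨hv, hg⟩ := IH i c hc
    simpa [List.foldl_cons, hv] using ihL (PySem.Int.mod (acc + recurseA array upBnd n f (p + 1) i) 1000000007) _ hg

lemma goB_spec (array : List Int) (upBnd n : Int) :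
    ∀ (fuel : Nat) (p prev : Int) (c : PySem.Dict (Int × Int) Int),
      GoodCache array upBnd n c → p ≤ n → fuel = (n - p).toNat + 1 →
      (goB array upBnd n fuel p prev c).1 = recurseA array upBnd n fuel p prev ∧
      GoodCache array upBnd n (goB array upBnd n fuel p prev c).2 := by
  intro fuel
  induction fuel with
  | zero => intro p prev c hc _ _; exact ⟨rfl, hc⟩
  | succ f ihf =>
    intro p prev c hc hp hfuel
    show (goB array upBnd n (f + 1) p prev c).1 = recurseA array upBnd n (f + 1) p prev ∧ _
    rw [goB]
    by_cases hne : p = n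
    · simp only [if_pos hne]
      refine ⟨?_, hc⟩
      rw [recurseA]
      simp only [if_pos hne]
    · have hpn : p < n := by omega
      have hfuel' : f = (n - (p + 1)).toNat + 1 := by omega
      have IH : ∀ prev' c', GoodCache array upBnd n c' →
          (goB array upBnd n f (p + 1) prev' c').1 = recurseA array upBnd n f (p + 1) prev' ∧
          GoodCache array upBnd n (goB array upBnd n f (p + 1) prev' c').2 :=
        fun prev' c' hc' => ihf (p + 1) prev' c' hc' (by omega) hfuel'
      simp only [if_neg hne]
      cases hhit : c.get? (p, prev) with
      | some hit =>
        refine ⟨?_, hc⟩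
        have hv := hc p prev hit hhit
        rw [hv, ← hfuel]
      | none =>
        -- the uncached case: B folds the mod-sum over kidsB; show it is A's value
        have hfold := fold_spec array upBnd n f p IH (kidsB array upBnd p prev) 0 c hc
        have hAval : (kidsB array upBnd p prev).foldl
            (fun allCombs i =>
              PySem.Int.mod (allCombs + recurseA array upBnd n f (p + 1) i) 1000000007) 0
            = recurseA array upBnd n (f + 1) p prev := by
          by_cases ha : PySem.List.pyGetD array p 0 = 0
          · rw [kidsB_zero array upBnd p prev ha, recurseA]
            simp only [if_neg hne, if_pos ha]
            exact PySem.List.foldl_congr_mem _ _ _ _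
              (fun acc x hx => (if_pos (pvGuardTrue prev upBnd x hx)).symm)
          · rw [recurseA]
            simp only [if_neg hne, if_neg ha]
            unfold kidsB
            simp only [ne_eq, ha, not_false_eq_true, if_true]
            by_cases habs : |PySem.List.pyGetD array p 0 - prev| ≤ 1
            · rw [if_pos habs, if_pos habs]
              simp only [List.foldl_cons, List.foldl_nil, zero_add]
              have hb := recurseA_bounds array upBnd n f (p + 1) (PySem.List.pyGetD array p 0)
              have : 0 < (1000000007 : Int) := by norm_num
              rw [PySem.Int.mod_eq_emod_of_pos this]
              exact Int.emod_eq_of_lt hb.1 hb.2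
            · rw [if_neg habs, if_neg habs]
              rfl
        refine ⟨hfold.1.trans hAval, ?_⟩
        apply goodCache_insert array upBnd n _ p prev _ hfold.2
        rw [← hfuel]
        exact hfold.1.trans hAval

-- ===== VERDICT (by name: the statement is the Claim_ definition above) =====
theorem recurse_spec : Claim_equal_recurse := by
  intro array pos prev_value upBnd n _ hpre
  unfold Spec_recurse recurse recurse_alt
  rcases hpre with ⟨_, h1, _⟩ | hpn | ⟨hne, ha, habs⟩
  · exact ((goB_spec array upBnd n ((n - pos).toNat + 1) pos prev_value PySem.Dict.empty
      (goodCache_empty array upBnd n) h1 rfl).1).symm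
  · rw [hpn, recurseA, goB]
    simp
  · rw [recurseA, goB]
    simp only [if_neg hne, PySem.Dict.get?_empty]
    unfold kidsB
    simp only [ne_eq, ha, not_false_eq_true, if_true, if_neg habs]
    simp
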